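-- pv_equiv track=rewrite | github.com/evensteven01/rs-logic-homeworks | Text/text_statistics.py | getTotalParagraphsInText
-- ===== SOURCE A (Python) =====
-- def getTotalParagraphsInText(text: str)-> int:
-- 	num_of_paragraph = 0
--
-- 	if text is None:
-- 		return num_of_paragraph
--
-- 	paragraphs = text.split("\n")
--
-- 	for p in paragraphs:
-- 		if p != "":
-- 			num_of_paragraph += 1
-- 	return num_of_paragraph
-- ===== SOURCE B (Python) =====
-- def getTotalParagraphsInText(text: str) -> int:
--     if text is None:
--         return 0
--     count = 0
--     in_run = False
--     for c in text:
--         if c != "\n":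
--             if not in_run:
--                 count += 1
--             in_run = True
--         else:
--             in_run = False
--     return count
-- ===== Notes on version B (the rewrite author's own statement) =====
-- stated objective: alternative
-- what changed: Replaces newline-split plus filter-count over the resulting list of lines by a single left-to-right character scan that counts the starts of maximal runs of non-newline characters, building no intermediate list.
import Mathlib
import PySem

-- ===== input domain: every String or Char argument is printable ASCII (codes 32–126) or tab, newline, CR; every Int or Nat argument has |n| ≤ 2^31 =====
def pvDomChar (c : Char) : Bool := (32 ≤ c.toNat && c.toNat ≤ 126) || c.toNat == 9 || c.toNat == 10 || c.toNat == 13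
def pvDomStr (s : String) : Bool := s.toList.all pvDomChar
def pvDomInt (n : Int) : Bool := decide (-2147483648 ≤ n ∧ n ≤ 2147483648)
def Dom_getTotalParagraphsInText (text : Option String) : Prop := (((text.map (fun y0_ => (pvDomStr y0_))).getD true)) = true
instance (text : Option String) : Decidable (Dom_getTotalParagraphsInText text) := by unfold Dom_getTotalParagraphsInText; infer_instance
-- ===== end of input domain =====

-- B replaces split-then-filter-count by one character scan counting run starts (alternative, same cost).

-- ===== PORT A =====
-- text.split("\n") → PySem.Chars.splitOn on the code points (sep ≠ ""); the pieces stay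
-- List Char, so Python's `p != ""` is `p ≠ []`.
def getTotalParagraphsInText (text : Option String) : Int :=
  let num0 : Int := 0
  match text with
  | none => num0
  | some t =>
      let paragraphs := PySem.Chars.splitOn t.toList ['\n']
      paragraphs.foldl (fun n p => if p ≠ [] then n + 1 else n) num0

-- ===== PORT B =====
def getTotalParagraphsInText_alt (text : Option String) : Int :=
  match text with
  | none => 0
  | some t =>
      (t.toList.foldl
        (fun (st : Int × Bool) c =>
          if c ≠ '\n' then (if st.2 then st.1 else st.1 + 1, true) else (st.1, false))
        (0, false)).1

-- ===== PRECONDITION & SPEC =====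
def Spec_getTotalParagraphsInText (text : Option String) (out : Int) : Prop := out = getTotalParagraphsInText_alt text
instance (text : Option String) (out : Int) : Decidable (Spec_getTotalParagraphsInText text out) := by unfold Spec_getTotalParagraphsInText; infer_instance

-- ===== CLAIM (what is proved, stated in full; the proofs are below) =====
def Claim_equal_getTotalParagraphsInText : Prop := ∀ (text : Option String), Dom_getTotalParagraphsInText text → Spec_getTotalParagraphsInText text (getTotalParagraphsInText text)

-- ===== LEMMAS AND PROOFS =====

-- structural recursion equivalent of split on a single-character separator
def splitRec (k : Char) : List Char → List (List Char)
  | [] => [[]]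
  | c :: r => if c = k then [] :: splitRec k r else (splitRec k r).modifyHead (c :: ·)

theorem splitRec_ne_nil (k : Char) (l : List Char) : splitRec k l ≠ [] := by
  cases l with
  | nil => simp [splitRec]
  | cons c r =>
      simp only [splitRec]
      split_ifs <;> simp [List.modifyHead_eq_nil_iff, splitRec_ne_nil k r]

theorem modifyHead_fun_id {α : Type} (l : List α) : l.modifyHead (fun x => x) = l := by
  cases l <;> simp [List.modifyHead]

theorem go_eq (k : Char) :
    ∀ (fuel : Nat) (l cur : List Char) (acc : List (List Char)), l.length < fuel →
      PySem.Chars.splitOn.go [k] fuel l cur acc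
        = acc.reverse ++ (splitRec k l).modifyHead (cur.reverse ++ ·) := by
  intro fuel
  induction fuel with
  | zero => intro l cur acc h; omega
  | succ fuel ih =>
      intro l cur acc h
      cases l with
      | nil => simp [PySem.Chars.splitOn.go, splitRec]
      | cons c rest =>
          by_cases hc : c = k
          · subst hc
            rw [show PySem.Chars.splitOn.go [c] (fuel+1) (c :: rest) cur acc
                  = PySem.Chars.splitOn.go [c] fuel rest [] (cur.reverse :: acc) from by
                  simp [PySem.Chars.splitOn.go, List.isPrefixOf]]
            rw [ih rest [] (cur.reverse :: acc) (by simpa using h)]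
            simp [splitRec, modifyHead_fun_id]
          · rw [show PySem.Chars.splitOn.go [k] (fuel+1) (c :: rest) cur acc
                  = PySem.Chars.splitOn.go [k] fuel rest (c :: cur) acc from by
                  simp only [PySem.Chars.splitOn.go, List.isPrefixOf]
                  split_ifs with hpre
                  · exact absurd ((by simpa using hpre : k = c)).symm hc
                  · rfl]
            rw [ih rest (c :: cur) acc (by simpa using h)]
            obtain ⟨p, ps, hp⟩ := List.exists_cons_of_ne_nil (splitRec_ne_nil k rest)
            simp [splitRec, hc, hp]

theorem splitOn_eq_splitRec (k : Char) (l : List Char) :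
    PySem.Chars.splitOn l [k] = splitRec k l := by
  have := go_eq k (l.length + 1) l [] [] (by omega)
  simpa [PySem.Chars.splitOn, modifyHead_fun_id] using this

-- number of nonempty pieces
def cntNE : List (List Char) → Int
  | [] => 0
  | p :: ps => (if p ≠ [] then 1 else 0) + cntNE ps

theorem foldl_cntNE (ps : List (List Char)) : ∀ n : Int,
    ps.foldl (fun n p => if p ≠ [] then n + 1 else n) n = n + cntNE ps := by
  induction ps with
  | nil => intro n; simp [cntNE]
  | cons p ps ih =>
      intro n
      simp only [List.foldl_cons, cntNE, ih]
      split_ifs <;> ring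

-- number of maximal non-newline runs, given whether we are already inside a run
def rcount : Bool → List Char → Int
  | _, [] => 0
  | b, c :: r => if c = '\n' then rcount false r else (if b then 0 else 1) + rcount true r

theorem cnt_splitRec (l : List Char) :
    cntNE (splitRec '\n' l) = rcount false l ∧
      cntNE (splitRec '\n' l).tail = rcount true l := by
  induction l with
  | nil => simp [splitRec, cntNE, rcount]
  | cons c r ih =>
      by_cases hc : c = '\n'
      · subst hc
        simp [splitRec, cntNE, rcount, ih.1]
      · obtain ⟨p, ps, hp⟩ := List.exists_cons_of_ne_nil (splitRec_ne_nil '\n' r)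
        have h1 := ih.1
        have h2 := ih.2
        rw [hp] at h1 h2
        constructor
        · simp only [splitRec, if_neg hc, hp, List.modifyHead, cntNE, rcount]
          simp only [List.tail_cons] at h2
          simp [h2]
        · simp only [splitRec, if_neg hc, hp, List.modifyHead, List.tail_cons, rcount]
          simpa using h2

theorem foldl_scan (l : List Char) : ∀ (n : Int) (b : Bool),
    (l.foldl
      (fun (st : Int × Bool) c =>
        if c ≠ '\n' then (if st.2 then st.1 else st.1 + 1, true) else (st.1, false))
      (n, b)).1 = n + rcount b l := by
  induction l with
  | nil => intro n b; simp [rcount]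
  | cons c r ih =>
      intro n b
      by_cases hc : c = '\n'
      · subst hc
        have h : (if ('\n' : Char) ≠ '\n' then (if b then n else n + 1, true) else (n, false)) = (n, false) := by simp
        rw [List.foldl_cons, h, ih]
        simp [rcount]
      · have h : (if c ≠ '\n' then (if b then n else n + 1, true) else (n, false)) = (if b then n else n + 1, true) := by simp [hc]
        rw [List.foldl_cons, h, ih]
        cases b <;> simp [rcount, hc] <;> try ring

-- ===== VERDICT (by name: the statement is the Claim_ definition above) =====
theorem getTotalParagraphsInText_spec : Claim_equal_getTotalParagraphsInText := by
  intro text _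
  unfold Spec_getTotalParagraphsInText getTotalParagraphsInText getTotalParagraphsInText_alt
  cases text with
  | none => rfl
  | some t =>
      simp only [splitOn_eq_splitRec, foldl_cntNE, foldl_scan, (cnt_splitRec t.toList).1]
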